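-- pv_equiv track=rewrite | github.com/hungrypro7/BaekjoonHub | 프로그래머스/3/214288. 상담원 인원/상담원 인원.py | waiting_time
-- ===== SOURCE A (Python) =====
-- from heapq import heappush, heappop
--
-- def waiting_time(li, num):    # 상담 유형별 시작-종료 시간 리스트, 상담원 숫자
--     total_time = 0
--     heap = []
--     for i in range(num):    # 상담원 숫자만큼 칸 생성
--         heappush(heap, 0)
--
--     for start, end in li:
--         temp = heappop(heap)
--         if start > temp:
--             heappush(heap, end)
--         else:
--             waiting_time = temp - start
--             total_time += waiting_time
--             heappush(heap, end + waiting_time)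
--     return total_time
-- ===== SOURCE B (Python) =====
-- def waiting_time(li, num):    # same contract as A; plain availability list instead of a heap
--     avail = [0] * num
--     total_time = 0
--     for start, end in li:
--         t = min(avail)
--         avail.remove(t)
--         w = max(0, t - start)
--         total_time += w
--         avail.append(end + w)
--     return total_time
-- ===== Notes on version B (the rewrite author's own statement) =====
-- stated objective: simpler
-- what changed: Replaces the binary heap (heappush/heappop) by a plain availability list scanned with min/remove, and folds A's two branches into one uniform step w = max(0, t - start).
import Mathlib
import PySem

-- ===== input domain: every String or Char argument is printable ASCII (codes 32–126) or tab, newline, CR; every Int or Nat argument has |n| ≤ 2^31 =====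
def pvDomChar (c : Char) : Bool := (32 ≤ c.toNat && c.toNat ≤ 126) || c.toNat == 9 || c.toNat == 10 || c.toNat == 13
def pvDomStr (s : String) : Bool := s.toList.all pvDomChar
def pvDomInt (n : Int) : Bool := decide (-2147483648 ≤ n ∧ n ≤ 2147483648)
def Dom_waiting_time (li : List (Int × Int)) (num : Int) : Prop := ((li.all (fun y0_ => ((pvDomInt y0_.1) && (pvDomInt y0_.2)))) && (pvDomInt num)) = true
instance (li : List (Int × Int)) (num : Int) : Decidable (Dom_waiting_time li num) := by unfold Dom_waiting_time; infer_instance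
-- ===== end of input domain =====

-- B keeps counselor availability times in a plain list (min + remove) instead of a heap and
-- merges A's two branches into one uniform 'w = max(0, t - start)' step; objective: simpler.

-- ===== PORT A =====
-- Python's heapq module is a library dependency of A; it is ported as a genuine min-heap
-- (skew-heap merge). Only the popped values (the minima) reach A's result.
inductive PVHeap where
  | nil : PVHeap
  | node : Int → PVHeap → PVHeap → PVHeap
deriving DecidableEq, Repr

def PVHeap.size : PVHeap → Nat
  | .nil => 0
  | .node _ l r => l.size + r.size + 1

def heapMerge : PVHeap → PVHeap → PVHeap
  | .nil, h => h
  | h, .nil => h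
  | .node x a b, .node y c d =>
    if x ≤ y then .node x (heapMerge b (.node y c d)) a
    else .node y (heapMerge d (.node x a b)) c
termination_by h₁ h₂ => h₁.size + h₂.size
decreasing_by all_goals (simp [PVHeap.size]; try omega)

def heappush (h : PVHeap) (x : Int) : PVHeap := heapMerge h (.node x .nil .nil)

-- heappop; Python raises IndexError on an empty heap — that input is excluded by Pre_,
-- the .nil branch is only a totalizing default.
def heappopD : PVHeap → Int × PVHeap
  | .nil => (0, .nil)
  | .node v l r => (v, heapMerge l r)

def loopA : List (Int × Int) → PVHeap → Int → Int
  | [], _, total => total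
  | (start, stop) :: rest, heap, total =>
    let p := heappopD heap
    if start > p.1 then loopA rest (heappush p.2 stop) total
    else loopA rest (heappush p.2 (stop + (p.1 - start))) (total + (p.1 - start))

def waiting_time (li : List (Int × Int)) (num : Int) : Int :=
  loopA li ((PySem.List.pyRange 0 num 1).foldl (fun h _ => heappush h 0) .nil) 0

-- ===== PORT B =====
def loopB : List (Int × Int) → List Int → Int → Int
  | [], _, total => total
  | (start, stop) :: rest, avail, total =>
    let t := (PySem.List.min? avail (fun x => x)).getD 0
    let avail' := (PySem.List.remove? avail t).getD avail
    let w := max 0 (t - start)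
    loopB rest (avail' ++ [stop + w]) (total + w)

def waiting_time_alt (li : List (Int × Int)) (num : Int) : Int :=
  loopB li (List.replicate num.toNat 0) 0

-- ===== PRECONDITION & SPEC =====
-- Pre_ excludes exactly the inputs where Python A raises: num ≤ 0 with a nonempty li
-- (heappop of an empty heap, IndexError; B's min([]) raises there too).
def Pre_waiting_time (li : List (Int × Int)) (num : Int) : Prop := li = [] ∨ 1 ≤ num
instance (li : List (Int × Int)) (num : Int) : Decidable (Pre_waiting_time li num) := by
  unfold Pre_waiting_time; infer_instance

def pvWitness_waiting_time : (List (Int × Int)) × Int := ([(1, 3), (2, 5)], 1)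

def Spec_waiting_time (li : List (Int × Int)) (num : Int) (out : Int) : Prop := out = waiting_time_alt li num
instance (li : List (Int × Int)) (num : Int) (out : Int) : Decidable (Spec_waiting_time li num out) := by unfold Spec_waiting_time; infer_instance

-- ===== CLAIM (what is proved, stated in full; the proofs are below) =====
def Claim_equal_waiting_time : Prop := ∀ (li : List (Int × Int)) (num : Int), Dom_waiting_time li num → Pre_waiting_time li num → Spec_waiting_time li num (waiting_time li num)

-- ===== LEMMAS AND PROOFS =====

def PVHeap.toMS : PVHeap → Multiset Int
  | .nil => 0
  | .node v l r => v ::ₘ (l.toMS + r.toMS)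

def PVHeap.HP : PVHeap → Prop
  | .nil => True
  | .node v l r => (∀ x ∈ l.toMS + r.toMS, v ≤ x) ∧ l.HP ∧ r.HP

theorem toMS_merge (a b : PVHeap) : (heapMerge a b).toMS = a.toMS + b.toMS := by
  fun_induction heapMerge a b with
  | case1 => simp [PVHeap.toMS]
  | case2 => simp [PVHeap.toMS]
  | case3 x a b y c d h ih =>
    simp only [PVHeap.toMS, ih, ← Multiset.singleton_add]
    abel
  | case4 x a b y c d h ih =>
    simp only [PVHeap.toMS, ih, ← Multiset.singleton_add]
    abel

theorem HP_merge (a b : PVHeap) : a.HP → b.HP → (heapMerge a b).HP := by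
  fun_induction heapMerge a b with
  | case1 => intro _ hb; exact hb
  | case2 => intro ha _; exact ha
  | case3 x a b y c d hxy ih =>
    intro ha hb
    obtain ⟨hba, ha1, ha2⟩ := ha
    obtain ⟨hbb, hb1, hb2⟩ := hb
    refine ⟨?_, ih ha2 ⟨hbb, hb1, hb2⟩, ha1⟩
    intro z hz
    rw [Multiset.mem_add] at hz
    rcases hz with hz | hz
    · rw [toMS_merge, Multiset.mem_add] at hz
      rcases hz with hz | hz
      · exact hba z (by simp [hz])
      · simp only [PVHeap.toMS, Multiset.mem_cons] at hz
        rcases hz with rfl | hz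
        · exact hxy
        · exact le_trans hxy (hbb z hz)
    · exact hba z (by simp [hz])
  | case4 x a b y c d hxy ih =>
    intro ha hb
    obtain ⟨hba, ha1, ha2⟩ := ha
    obtain ⟨hbb, hb1, hb2⟩ := hb
    refine ⟨?_, ih hb2 ⟨hba, ha1, ha2⟩, hb1⟩
    intro z hz
    rw [Multiset.mem_add] at hz
    rcases hz with hz | hz
    · rw [toMS_merge, Multiset.mem_add] at hz
      rcases hz with hz | hz
      · exact hbb z (by simp [hz])
      · simp only [PVHeap.toMS, Multiset.mem_cons] at hz
        rcases hz with rfl | hz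
        · omega
        · exact le_trans (by omega) (hba z hz)
    · exact hbb z (by simp [hz])

theorem root_le (v : Int) (l r : PVHeap) (h : (PVHeap.node v l r).HP) :
    ∀ x ∈ (PVHeap.node v l r).toMS, v ≤ x := by
  intro x hx
  simp only [PVHeap.toMS, Multiset.mem_cons] at hx
  rcases hx with rfl | hx
  · exact le_refl x
  · exact h.1 x hx

theorem toMS_push (h : PVHeap) (x : Int) : (heappush h x).toMS = x ::ₘ h.toMS := by
  simp only [heappush, toMS_merge, PVHeap.toMS, ← Multiset.singleton_add]
  abel

theorem HP_push (h : PVHeap) (x : Int) (hh : h.HP) : (heappush h x).HP :=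
  HP_merge _ _ hh (by simp [PVHeap.HP, PVHeap.toMS])

theorem min?_eq_root (v : Int) (l r : PVHeap) (avail : List Int)
    (hHP : (PVHeap.node v l r).HP) (hms : (PVHeap.node v l r).toMS = (avail : Multiset Int)) :
    PySem.List.min? avail (fun x => x) = some v := by
  have hv : v ∈ avail := by
    have : v ∈ (PVHeap.node v l r).toMS := by simp [PVHeap.toMS]
    rw [hms, Multiset.mem_coe] at this; exact this
  have hne : avail ≠ [] := by rintro rfl; simp at hv
  obtain ⟨m, hm⟩ : ∃ m, PySem.List.min? avail (fun x => x) = some m := by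
    cases hmin : PySem.List.min? avail (fun x => x) with
    | none => exact absurd ((PySem.List.min?_eq_none_iff avail (fun x => x)).mp hmin) hne
    | some m => exact ⟨m, rfl⟩
  have hmem := PySem.List.min?_mem hm
  have hmv : m ≤ v := PySem.List.min?_isMin hm v hv
  have hvm : v ≤ m := by
    apply root_le v l r hHP
    rw [hms, Multiset.mem_coe]; exact hmem
  rw [hm, le_antisymm hmv hvm]

theorem loop_eq (li : List (Int × Int)) (heap : PVHeap) (avail : List Int) (total : Int)
    (hHP : heap.HP) (hms : heap.toMS = (avail : Multiset Int)) (hne : avail ≠ []) :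
    loopA li heap total = loopB li avail total := by
  induction li generalizing heap avail total with
  | nil => rfl
  | cons p rest ih =>
    obtain ⟨start, stop⟩ := p
    cases heap with
    | nil =>
      exfalso
      apply hne
      have : (0 : Multiset Int) = (avail : Multiset Int) := hms
      simpa [Multiset.coe_eq_zero] using this.symm
    | node v l r =>
      have hmin : PySem.List.min? avail (fun x => x) = some v := min?_eq_root v l r avail hHP hms
      have hv : v ∈ avail := by
        have : v ∈ (PVHeap.node v l r).toMS := by simp [PVHeap.toMS]
        rw [hms, Multiset.mem_coe] at this; exact this
      have hrem : PySem.List.remove? avail v = some (avail.erase v) :=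
        PySem.List.remove?_eq_some_erase avail v hv
      have hms' : (heapMerge l r).toMS = ((avail.erase v : List Int) : Multiset Int) := by
        rw [toMS_merge]
        have h2 : ((avail.erase v : List Int) : Multiset Int) = (avail : Multiset Int).erase v := by
          rw [Multiset.coe_erase]
        rw [h2, ← hms]
        simp [PVHeap.toMS]
      have hHP' : (heapMerge l r).HP := HP_merge l r hHP.2.1 hHP.2.2
      simp only [loopA, loopB, heappopD, hmin, hrem, Option.getD_some]
      by_cases hgt : start > v
      · have hw : max 0 (v - start) = 0 := max_eq_left (by omega)
        rw [if_pos hgt, hw]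
        have := ih (heappush (heapMerge l r) stop) (avail.erase v ++ [stop + 0]) total
          (HP_push _ _ hHP')
          (by rw [toMS_push, hms']
              simp only [← Multiset.coe_add]
              simp [← Multiset.singleton_add]
              abel)
          (by simp)
        simpa using this
      · have hw : max 0 (v - start) = v - start := max_eq_right (by omega)
        rw [if_neg hgt, hw]
        exact ih (heappush (heapMerge l r) (stop + (v - start)))
          (avail.erase v ++ [stop + (v - start)]) (total + (v - start))
          (HP_push _ _ hHP')
          (by rw [toMS_push, hms']
              simp only [← Multiset.coe_add]
              simp [← Multiset.singleton_add]
              abel)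
          (by simp)

theorem init_toMS (l : List Int) (s : PVHeap) :
    (l.foldl (fun h _ => heappush h 0) s).toMS = s.toMS + Multiset.replicate l.length 0 := by
  induction l generalizing s with
  | nil => simp
  | cons x t ih =>
    simp only [List.foldl_cons, ih, toMS_push, List.length_cons, Multiset.replicate_succ,
      ← Multiset.singleton_add]
    abel

theorem init_HP (l : List Int) (s : PVHeap) (hs : s.HP) :
    (l.foldl (fun h _ => heappush h 0) s).HP := by
  induction l generalizing s with
  | nil => exact hs
  | cons x t ih => exact ih _ (HP_push _ _ hs)

-- ===== VERDICT (by name: the statement is the Claim_ definition above) =====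
theorem waiting_time_spec : Claim_equal_waiting_time := by
  intro li num _ hpre
  unfold Spec_waiting_time waiting_time waiting_time_alt
  rcases hpre with rfl | hnum
  · cases hli : (List.replicate num.toNat (0 : Int)) <;> rfl
  · apply loop_eq
    · exact init_HP _ _ trivial
    · rw [init_toMS]
      simp [PVHeap.toMS, PySem.List.length_pyRange_one, Multiset.coe_replicate]
    · have : 1 ≤ num.toNat := by omega
      simp only [ne_eq, List.replicate_eq_nil_iff]
      omega
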